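-- pv_equiv track=rewrite | github.com/state-alchemists/zrb | src/zrb/util/string/thinking.py | _remove_tags_for_names
-- ===== SOURCE A (Python) =====
-- def _remove_tags_for_names(text: str, tag_names: list[str]) -> str:
--     """Remove tags for multiple tag names with proper nesting handling."""
--
--     def remove_tags_for_name(text: str, tag_name: str) -> str:
--         """Remove <tag_name>...</tag_name> tags with proper nesting handling."""
--         open_tag = f"<{tag_name}>"
--         close_tag = f"</{tag_name}>"
--         open_len = len(open_tag)
--         close_len = len(close_tag)
--
--         result = []
--         i = 0
--         n = len(text)
--
--         while i < n:
--             # Check for opening tag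
--             if text.startswith(open_tag, i):
--                 # Find matching closing tag
--                 depth = 1
--                 j = i + open_len
--                 while j < n and depth > 0:
--                     if text.startswith(open_tag, j):
--                         depth += 1
--                         j += open_len
--                     elif text.startswith(close_tag, j):
--                         depth -= 1
--                         if depth == 0:
--                             # Found matching closing tag
--                             i = j + close_len
--                             break
--                         j += close_len
--                     else:
--                         j += 1
--                 else:
--                     # No matching closing tag found, treat opening tag as text
--                     result.append(open_tag)
--                     i += open_len
--             # Check for closing tag without opening (preserve as text)
--             elif text.startswith(close_tag, i):
--                 result.append(close_tag)
--                 i += close_len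
--             else:
--                 # Regular character
--                 result.append(text[i])
--                 i += 1
--
--         return "".join(result)
--
--     # Remove tags for each tag name
--     for tag_name in tag_names:
--         text = remove_tags_for_name(text, tag_name)
--
--     return text
-- ===== SOURCE B (Python) =====
-- def _remove_tags_for_names(text: str, tag_names: list[str]) -> str:
--     """Remove tags for multiple tag names with proper nesting handling.
--
--     Single pass per tag name using a stack of output buffers, one
--     per open-tag nesting level; a matched close tag discards its buffer,
--     unmatched open tags are flushed back as literal text at the end.
--     """
--     for tag_name in tag_names:
--         open_tag = f"<{tag_name}>"
--         close_tag = f"</{tag_name}>"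
--         ol, cl = len(open_tag), len(close_tag)
--         stack = [[]]  # stack[0] is the output; each deeper level is one open tag
--         i, n = 0, len(text)
--         while i < n:
--             if text.startswith(open_tag, i):
--                 stack.append([])
--                 i += ol
--             elif text.startswith(close_tag, i):
--                 if len(stack) > 1:
--                     stack.pop()  # discard the matched region
--                 else:
--                     stack[0].append(close_tag)
--                 i += cl
--             else:
--                 stack[-1].append(text[i])
--                 i += 1
--         # unmatched open tags stay as literal text, followed by their content
--         out = stack[0]
--         for buf in stack[1:]:
--             out.append(open_tag)
--             out.extend(buf)
--         text = "".join(out)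
--     return text
-- ===== Notes on version B (the rewrite author's own statement) =====
-- stated objective: alternative
-- what changed: A scans ahead from every open tag with a depth counter to locate the matching close tag and re-scans the region after an unmatched open tag; B makes a single pass per tag name with a stack of output buffers, discarding the top buffer when a close tag matches and flushing unmatched buffers back as literal text at the end.
import Mathlib
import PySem

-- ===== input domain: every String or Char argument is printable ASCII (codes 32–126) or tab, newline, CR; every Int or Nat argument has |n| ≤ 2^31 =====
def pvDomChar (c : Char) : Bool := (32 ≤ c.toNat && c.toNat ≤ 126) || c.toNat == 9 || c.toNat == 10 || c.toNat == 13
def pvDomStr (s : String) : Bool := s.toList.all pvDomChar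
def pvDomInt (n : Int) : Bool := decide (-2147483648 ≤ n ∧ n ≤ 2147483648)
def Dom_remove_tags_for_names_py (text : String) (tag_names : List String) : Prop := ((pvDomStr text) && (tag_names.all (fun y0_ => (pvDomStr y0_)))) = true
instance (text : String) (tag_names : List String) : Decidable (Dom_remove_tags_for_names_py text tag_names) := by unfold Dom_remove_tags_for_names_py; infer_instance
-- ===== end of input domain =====

-- B replaces A's scan-ahead search for each matching close tag by one pass with a
-- stack of output buffers (one per nesting level); same return value.

-- ===== PORT A =====

-- open_tag = f"<{tag_name}>", close_tag = f"</{tag_name}>" (as char lists)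
def otag (nm : List Char) : List Char := '<' :: (nm ++ ['>'])
def ctag (nm : List Char) : List Char := '<' :: '/' :: (nm ++ ['>'])

-- Python's text.startswith(p, i) for 0 ≤ i (exact: text[i:] begins with p)
def pvStarts (p cs : List Char) (i : Nat) : Bool := p.isPrefixOf (cs.drop i)

-- A's inner `while j < n and depth > 0` search; `some i'` = matching close found and
-- `i = j + close_len` executed before `break`; `none` = the loop's `else` (no match).
-- `fuel` only makes the loop structurally recursive: the position strictly increases
-- each iteration, so `n + 1` fuel is never exhausted.
def aSearch (cs nm : List Char) : Nat → Nat → Nat → Option Nat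
  | 0, _, _ => none
  | fuel + 1, j, depth =>
    if j < cs.length ∧ 0 < depth then
      if pvStarts (otag nm) cs j then aSearch cs nm fuel (j + (otag nm).length) (depth + 1)
      else if pvStarts (ctag nm) cs j then
        if depth = 1 then some (j + (ctag nm).length)
        else aSearch cs nm fuel (j + (ctag nm).length) (depth - 1)
      else aSearch cs nm fuel (j + 1) depth
    else none

-- A's outer while loop; `res` is the accumulated `result` list.
def aLoop (cs nm : List Char) : Nat → Nat → List Char → List Char
  | 0, _, res => res
  | fuel + 1, i, res =>
    if h : i < cs.length then
      if pvStarts (otag nm) cs i then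
        match aSearch cs nm (cs.length + 1) (i + (otag nm).length) 1 with
        | some i2 => aLoop cs nm fuel i2 res
        | none => aLoop cs nm fuel (i + (otag nm).length) (res ++ otag nm)
      else if pvStarts (ctag nm) cs i then aLoop cs nm fuel (i + (ctag nm).length) (res ++ ctag nm)
      else aLoop cs nm fuel (i + 1) (res ++ [cs[i]])   -- text[i] with 0 ≤ i < n: exact
    else res

def remove_tags_for_names_py (text : String) (tag_names : List String) : String :=
  String.ofList (tag_names.foldl (fun cs nm => aLoop cs nm.toList (cs.length + 1) 0 []) text.toList)

-- ===== PORT B =====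

-- end-of-text flush: each unmatched open tag stays as literal text before its buffer
def bFlush (nm : List Char) (cur : List Char) : List (List Char) → List Char
  | [] => cur
  | p :: ps => bFlush nm (p ++ otag nm ++ cur) ps

-- B's single pass: `cur` = top buffer (stack[-1]), `pending` = the lower buffers, top
-- first; `fuel` again only makes the strictly advancing loop structurally recursive.
def bLoop (cs nm : List Char) : Nat → Nat → List Char → List (List Char) → List Char
  | 0, _, cur, pending => bFlush nm cur pending
  | fuel + 1, i, cur, pending =>
    if h : i < cs.length then
      if pvStarts (otag nm) cs i then bLoop cs nm fuel (i + (otag nm).length) [] (cur :: pending)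
      else if pvStarts (ctag nm) cs i then
        match pending with
        | p :: ps => bLoop cs nm fuel (i + (ctag nm).length) p ps   -- pop: discard matched region
        | [] => bLoop cs nm fuel (i + (ctag nm).length) (cur ++ ctag nm) []
      else bLoop cs nm fuel (i + 1) (cur ++ [cs[i]]) pending
    else bFlush nm cur pending

def remove_tags_for_names_py_alt (text : String) (tag_names : List String) : String :=
  String.ofList (tag_names.foldl (fun cs nm => bLoop cs nm.toList (cs.length + 1) 0 [] []) text.toList)

-- ===== PRECONDITION & SPEC =====
def Spec_remove_tags_for_names_py (text : String) (tag_names : List String) (out : String) : Prop := out = remove_tags_for_names_py_alt text tag_names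
instance (text : String) (tag_names : List String) (out : String) : Decidable (Spec_remove_tags_for_names_py text tag_names out) := by unfold Spec_remove_tags_for_names_py; infer_instance

-- ===== CLAIM (what is proved, stated in full; the proofs are below) =====
def Claim_equal_remove_tags_for_names_py : Prop := ∀ (text : String) (tag_names : List String), Dom_remove_tags_for_names_py text tag_names → Spec_remove_tags_for_names_py text tag_names (remove_tags_for_names_py text tag_names)

-- ===== LEMMAS AND PROOFS =====

@[simp] theorem otag_length (nm : List Char) : (otag nm).length = nm.length + 2 := by
  simp [otag]
@[simp] theorem ctag_length (nm : List Char) : (ctag nm).length = nm.length + 3 := by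
  simp [ctag]

-- fuel irrelevance: any fuel above the remaining length gives the same result
theorem aSearch_fuel (cs nm : List Char) : ∀ (f g j d : Nat), cs.length - j < f →
    cs.length - j < g → aSearch cs nm f j d = aSearch cs nm g j d := by
  intro f
  induction f with
  | zero => intro g j d hf; omega
  | succ f IH =>
    intro g j d hf hg
    cases g with
    | zero => omega
    | succ g =>
      simp only [aSearch]
      by_cases hc0 : j < cs.length ∧ 0 < d
      · rw [if_pos hc0, if_pos hc0]
        split
        · exact IH g _ _ (by simp only [otag_length]; omega) (by simp only [otag_length]; omega)
        · split
          · split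
            · rfl
            · exact IH g _ _ (by simp only [ctag_length]; omega) (by simp only [ctag_length]; omega)
          · exact IH g _ _ (by omega) (by omega)
      · rw [if_neg hc0, if_neg hc0]

theorem aSearch_lt (cs nm : List Char) : ∀ (f j d i2 : Nat),
    aSearch cs nm f j d = some i2 → j < i2 := by
  intro f
  induction f with
  | zero => intro j d i2 hs; cases hs
  | succ f IH =>
    intro j d i2 hs
    simp only [aSearch] at hs
    split at hs
    · split at hs
      · have := IH _ _ _ hs; simp only [otag_length] at this; omega
      · split at hs
        · split at hs
          · injection hs with h; simp only [ctag_length] at h; omega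
          · have := IH _ _ _ hs; simp only [ctag_length] at this; omega
        · have := IH _ _ _ hs; omega
    · cases hs

theorem bLoop_fuel (cs nm : List Char) : ∀ (f g i : Nat) (cur : List Char)
    (pending : List (List Char)), cs.length - i < f → cs.length - i < g →
    bLoop cs nm f i cur pending = bLoop cs nm g i cur pending := by
  intro f
  induction f with
  | zero => intro g i cur pending hf; omega
  | succ f IH =>
    intro g i cur pending hf hg
    cases g with
    | zero => omega
    | succ g =>
      simp only [bLoop]
      by_cases hlt : i < cs.length
      · rw [dif_pos hlt, dif_pos hlt]
        split
        · exact IH g _ _ _ (by simp only [otag_length]; omega) (by simp only [otag_length]; omega)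
        · split
          · cases pending with
            | nil => exact IH g _ _ _ (by simp only [ctag_length]; omega) (by simp only [ctag_length]; omega)
            | cons p ps => exact IH g _ _ _ (by simp only [ctag_length]; omega) (by simp only [ctag_length]; omega)
          · exact IH g _ _ _ (by omega) (by omega)
      · rw [dif_neg hlt, dif_neg hlt]

-- A's loop only appends to `res`
theorem aLoop_append (cs nm : List Char) : ∀ (f i : Nat) (res : List Char),
    aLoop cs nm f i res = res ++ aLoop cs nm f i [] := by
  intro f
  induction f with
  | zero => intro i res; simp [aLoop]
  | succ f IH =>
    intro i res
    simp only [aLoop]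
    by_cases hlt : i < cs.length
    · rw [dif_pos hlt, dif_pos hlt]
      split
      · rcases hs : aSearch cs nm (cs.length + 1) (i + (otag nm).length) 1 with _ | i2
        · rw [IH _ (res ++ otag nm), IH _ ([] ++ otag nm)]
          simp
        · exact IH _ res
      · split
        · rw [IH _ (res ++ ctag nm), IH _ ([] ++ ctag nm)]
          simp
        · rw [IH _ (res ++ [cs[i]]), IH _ ([] ++ [cs[i]])]
          simp
    · rw [dif_neg hlt, dif_neg hlt]
      simp

-- L1: while A's search succeeds, B's pass discards exactly the pushed buffers
theorem bLoop_pop (cs nm : List Char) : ∀ (f j d i2 : Nat), cs.length - j < f →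
    aSearch cs nm f j d = some i2 →
    ∀ (ds : List (List Char)) (cur p : List Char) (pending : List (List Char)) (g : Nat),
      cs.length - i2 < g → ds.length + 1 = d →
      bLoop cs nm f j cur (ds ++ p :: pending) = bLoop cs nm g i2 p pending := by
  intro f
  induction f with
  | zero => intro j d i2 hf; omega
  | succ f IH =>
    intro j d i2 hf hs ds cur p pending g hg hd
    simp only [aSearch] at hs
    split at hs
    · rename_i hc0
      simp only [bLoop, dif_pos hc0.1]
      split at hs
      · rename_i ho
        rw [if_pos ho]
        exact IH _ _ _ (by simp only [otag_length]; omega) hs (cur :: ds) [] p pending g hg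
          (by simp; omega)
      · rename_i ho
        rw [if_neg ho]
        split at hs
        · rename_i hc
          rw [if_pos hc]
          split at hs
          · rename_i hd1
            have hds : ds = [] := by
              cases ds with
              | nil => rfl
              | cons a b => simp at hd; omega
            subst hds
            injection hs with h9
            simp only [List.nil_append]
            rw [bLoop_fuel cs nm f g _ p pending
              (by simp only [ctag_length]; omega)
              (by simp only [ctag_length] at h9 ⊢; omega), h9]
          · rename_i hd1
            cases ds with
            | nil => simp at hd; omega
            | cons d0 ds' =>
              simp only [List.cons_append]
              exact IH _ _ _ (by simp only [ctag_length]; omega) hs ds' d0 p pending g hg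
                (by simp at hd ⊢; omega)
        · rename_i hc
          rw [if_neg hc]
          exact IH _ _ _ (by omega) hs ds (cur ++ [cs[j]'hc0.1]) p pending g hg hd
    · cases hs

-- composition of A's depth counter: searching at depth d+1 = search at depth 1, then at depth d
theorem aSearch_comp (cs nm : List Char) : ∀ (f j d : Nat), cs.length - j < f → 1 ≤ d →
    aSearch cs nm f j (d + 1) = (match aSearch cs nm f j 1 with
      | some i2 => aSearch cs nm f i2 d
      | none => none) := by
  intro f
  induction f with
  | zero => intro j d hf; omega
  | succ f IH =>
    intro j d hf hd
    by_cases hlt : j < cs.length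
    · by_cases ho : pvStarts (otag nm) cs j = true
      · conv_lhs => rw [aSearch]
        rw [if_pos ⟨hlt, by omega⟩, if_pos ho]
        conv_rhs => rw [aSearch]
        rw [if_pos ⟨hlt, by omega⟩, if_pos ho]
        rw [IH _ (d + 1) (by simp only [otag_length]; omega) (by omega)]
        rw [IH _ 1 (by simp only [otag_length]; omega) (by omega)]
        rcases hs1 : aSearch cs nm f (j + (otag nm).length) 1 with _ | i1
        · simp
        · simp only []
          have hi1 := aSearch_lt cs nm _ _ _ _ hs1
          simp only [otag_length] at hi1
          rw [IH i1 d (by omega) hd]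
          rcases hs2 : aSearch cs nm f i1 1 with _ | i2
          · simp
          · simp only []
            have hi2 := aSearch_lt cs nm _ _ _ _ hs2
            exact aSearch_fuel cs nm f (f + 1) _ _ (by omega) (by omega)
      · by_cases hc : pvStarts (ctag nm) cs j = true
        · conv_lhs => rw [aSearch]
          rw [if_pos ⟨hlt, by omega⟩, if_neg ho, if_pos hc, if_neg (by omega : ¬ d + 1 = 1)]
          conv_rhs => rw [aSearch]
          rw [if_pos ⟨hlt, by omega⟩, if_neg ho, if_pos hc, if_pos rfl]
          simp only [Nat.add_sub_cancel]
          exact aSearch_fuel cs nm f (f + 1) _ _ (by simp only [ctag_length]; omega)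
            (by simp only [ctag_length]; omega)
        · conv_lhs => rw [aSearch]
          rw [if_pos ⟨hlt, by omega⟩, if_neg ho, if_neg hc]
          conv_rhs => rw [aSearch]
          rw [if_pos ⟨hlt, by omega⟩, if_neg ho, if_neg hc]
          rw [IH _ d (by omega) hd]
          rcases hs1 : aSearch cs nm f (j + 1) 1 with _ | i1
          · simp
          · simp only []
            have hi1 := aSearch_lt cs nm _ _ _ _ hs1
            exact aSearch_fuel cs nm f (f + 1) _ _ (by omega) (by omega)
    · conv_lhs => rw [aSearch]
      rw [if_neg (by omega : ¬ (j < cs.length ∧ 0 < d + 1))]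
      conv_rhs => rw [aSearch]
      rw [if_neg (by omega : ¬ (j < cs.length ∧ 0 < 1))]

-- L2: if A's search fails, B's unmatched buffer merges into its parent after the open tag
theorem bLoop_fail (cs nm : List Char) : ∀ (f j : Nat), cs.length - j < f →
    aSearch cs nm f j 1 = none →
    ∀ (t b : List Char) (pending : List (List Char)),
      bLoop cs nm f j t (b :: pending) = bLoop cs nm f j (b ++ otag nm ++ t) pending := by
  intro f
  induction f with
  | zero => intro j hf; omega
  | succ f IH =>
    intro j hf hs t b pending
    simp only [aSearch] at hs
    simp only [bLoop]
    split at hs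
    · rename_i hc0
      rw [dif_pos hc0.1, dif_pos hc0.1]
      split at hs
      · rename_i ho
        rw [if_pos ho, if_pos ho]
        rw [aSearch_comp cs nm f _ 1 (by simp only [otag_length]; omega) (by omega)] at hs
        rcases hs1 : aSearch cs nm f (j + (otag nm).length) 1 with _ | i1
        · -- inner open never closes either: merge twice on the left, once on the right
          rw [IH _ (by simp only [otag_length]; omega) hs1 [] t (b :: pending)]
          rw [IH _ (by simp only [otag_length]; omega) hs1 _ b pending]
          rw [IH _ (by simp only [otag_length]; omega) hs1 [] (b ++ otag nm ++ t) pending]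
          simp
        · -- inner open closes at i1, then the search from i1 fails
          rw [hs1] at hs
          simp only [] at hs
          have hi1 := aSearch_lt cs nm _ _ _ _ hs1
          simp only [otag_length] at hi1
          have hp1 := bLoop_pop cs nm f _ _ _ (by simp only [otag_length]; omega) hs1
            [] [] t (b :: pending) f (by omega) rfl
          have hp2 := bLoop_pop cs nm f _ _ _ (by simp only [otag_length]; omega) hs1
            [] [] (b ++ otag nm ++ t) pending f (by omega) rfl
          simp only [List.nil_append] at hp1 hp2
          rw [hp1, hp2]
          exact IH i1 (by omega) hs t b pending
      · rename_i ho
        split at hs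
        · rename_i hc
          split at hs
          · cases hs
          · rename_i hd1
            exact absurd trivial hd1
        · rename_i hc
          rw [if_neg ho, if_neg ho, if_neg hc, if_neg hc]
          rw [IH (j + 1) (by omega) hs (t ++ [cs[j]'hc0.1]) b pending]
          simp [List.append_assoc]
    · rename_i hc0
      have hj : ¬ j < cs.length := by omega
      rw [dif_neg hj, dif_neg hj]
      simp [bFlush]

-- Main: B at top level (empty pending stack) computes A's remaining output
theorem bLoop_main (cs nm : List Char) : ∀ (f i : Nat) (cur : List Char), cs.length - i < f →
    bLoop cs nm f i cur [] = cur ++ aLoop cs nm f i [] := by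
  intro f
  induction f with
  | zero => intro i cur hf; omega
  | succ f IH =>
    intro i cur hf
    simp only [bLoop, aLoop]
    by_cases hlt : i < cs.length
    · rw [dif_pos hlt, dif_pos hlt]
      by_cases ho : pvStarts (otag nm) cs i = true
      · rw [if_pos ho, if_pos ho]
        rcases hs : aSearch cs nm (cs.length + 1) (i + (otag nm).length) 1 with _ | i2
        · have hs' : aSearch cs nm f (i + (otag nm).length) 1 = none := by
            rw [aSearch_fuel cs nm f (cs.length + 1) _ _ (by simp only [otag_length]; omega)
              (by omega)]
            exact hs
          rw [bLoop_fail cs nm f _ (by simp only [otag_length]; omega) hs' [] cur []]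
          rw [IH _ _ (by simp only [otag_length]; omega)]
          rw [aLoop_append cs nm f _ ([] ++ otag nm)]
          simp
        · have hi2 := aSearch_lt cs nm _ _ _ _ hs
          simp only [otag_length] at hi2
          have hs' : aSearch cs nm f (i + (otag nm).length) 1 = some i2 := by
            rw [aSearch_fuel cs nm f (cs.length + 1) _ _ (by simp only [otag_length]; omega)
              (by omega)]
            exact hs
          have hp := bLoop_pop cs nm f _ _ _ (by simp only [otag_length]; omega) hs'
            [] [] cur [] f (by omega) rfl
          simp only [List.nil_append] at hp
          rw [hp]
          exact IH i2 cur (by omega)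
      · rw [if_neg ho, if_neg ho]
        by_cases hc : pvStarts (ctag nm) cs i = true
        · rw [if_pos hc, if_pos hc]
          rw [IH _ _ (by simp only [ctag_length]; omega)]
          rw [aLoop_append cs nm f _ ([] ++ ctag nm)]
          simp
        · rw [if_neg hc, if_neg hc]
          rw [IH _ _ (by omega)]
          rw [aLoop_append cs nm f _ ([] ++ [cs[i]])]
          simp
    · rw [dif_neg hlt, dif_neg hlt]
      simp [bFlush]

theorem perTag_eq (cs nm : List Char) :
    bLoop cs nm (cs.length + 1) 0 [] [] = aLoop cs nm (cs.length + 1) 0 [] := by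
  simpa using bLoop_main cs nm (cs.length + 1) 0 [] (by omega)

theorem fold_eq (ts : List String) : ∀ (cs : List Char),
    ts.foldl (fun cs nm => aLoop cs nm.toList (cs.length + 1) 0 []) cs
      = ts.foldl (fun cs nm => bLoop cs nm.toList (cs.length + 1) 0 [] []) cs := by
  intro cs
  simp only [perTag_eq]

-- ===== VERDICT (by name: the statement is the Claim_ definition above) =====
theorem remove_tags_for_names_py_spec : Claim_equal_remove_tags_for_names_py := by
  intro text tag_names _
  unfold Spec_remove_tags_for_names_py remove_tags_for_names_py remove_tags_for_names_py_alt
  rw [fold_eq]
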